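-- pv_equiv track=rewrite | github.com/JoonHoSeong/CodingTest_Practices | 프로그래머스/0/181864. 문자열 바꿔서 찾기/문자열 바꿔서 찾기.py | solution
-- ===== SOURCE A (Python) =====
-- def solution(myString, pat):
--     temp = ''
--     for i in pat :
--         if i =='A' :
--             temp += 'B'
--         else :
--             temp += 'A'
--     if temp in myString :
--         return 1
--     return 0
-- ===== SOURCE B (Python) =====
-- def _match(s, p):
--     # does s start with the A/B-swapped version of p?
--     if len(s) < len(p):
--         return False
--     return all(s[j] == ('B' if p[j] == 'A' else 'A') for j in range(len(p)))
--
-- def solution(myString, pat):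
--     s = myString
--     while True:
--         if _match(s, pat):
--             return 1
--         if not s:
--             return 0
--         s = s[1:]
-- ===== Notes on version B (the rewrite author's own statement) =====
-- stated objective: alternative
-- what changed: B never builds the swapped pattern string: it slides over myString's suffixes and compares each window character-by-character against the swap of pat on the fly, instead of concatenating temp and using Python's substring 'in'.
import Mathlib
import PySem

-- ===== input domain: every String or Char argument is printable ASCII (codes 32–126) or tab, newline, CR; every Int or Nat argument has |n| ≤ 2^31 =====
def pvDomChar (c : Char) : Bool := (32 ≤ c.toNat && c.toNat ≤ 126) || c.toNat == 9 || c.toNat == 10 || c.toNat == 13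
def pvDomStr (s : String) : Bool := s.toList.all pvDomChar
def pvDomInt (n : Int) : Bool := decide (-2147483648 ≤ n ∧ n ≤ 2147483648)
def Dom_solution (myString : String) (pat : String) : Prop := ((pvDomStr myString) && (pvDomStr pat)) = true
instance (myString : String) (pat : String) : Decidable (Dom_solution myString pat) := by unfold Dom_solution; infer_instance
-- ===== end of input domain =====

-- B slides over myString's suffixes comparing each window to the A/B-swap of pat on the fly,
-- instead of A's building of the swapped string and a substring test (alternative structure, same cost).


-- ===== PORT A =====
-- temp = '' ; for i in pat: temp += 'B' if i == 'A' else 'A' ; return 1 if temp in myString else 0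
def solution (myString : String) (pat : String) : Int :=
  let temp : List Char :=
    pat.toList.foldl (fun acc i => acc ++ (if i == 'A' then ['B'] else ['A'])) []
  if PySem.Chars.isIn temp myString.toList then 1 else 0

-- ===== PORT B =====
-- _match(s, p): does s start with the swapped p, compared character by character
def pvMatchSwap : List Char → List Char → Bool
  | _, [] => true
  | [], _ :: _ => false
  | c :: s, p :: ps => (c == (if p == 'A' then 'B' else 'A')) && pvMatchSwap s ps

-- the while-loop over successive suffixes of myString
def pvScanSwap (p : List Char) : List Char → Int
  | [] => if pvMatchSwap [] p then 1 else 0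
  | c :: t => if pvMatchSwap (c :: t) p then 1 else pvScanSwap p t

def solution_alt (myString : String) (pat : String) : Int :=
  pvScanSwap pat.toList myString.toList

-- ===== PRECONDITION & SPEC =====
def Spec_solution (myString : String) (pat : String) (out : Int) : Prop := out = solution_alt myString pat
instance (myString : String) (pat : String) (out : Int) : Decidable (Spec_solution myString pat out) := by unfold Spec_solution; infer_instance

-- ===== CLAIM (what is proved, stated in full; the proofs are below) =====
def Claim_equal_solution : Prop := ∀ (myString : String) (pat : String), Dom_solution myString pat → Spec_solution myString pat (solution myString pat)

-- ===== LEMMAS AND PROOFS =====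

def pvSwapc (c : Char) : Char := if c == 'A' then 'B' else 'A'

theorem pv_foldl_swap (p : List Char) (acc : List Char) :
    p.foldl (fun acc i => acc ++ (if i == 'A' then ['B'] else ['A'])) acc = acc ++ p.map pvSwapc := by
  induction p generalizing acc with
  | nil => simp
  | cons c t ih => rw [List.foldl_cons, ih]; simp only [pvSwapc, List.map_cons, List.append_assoc]; split_ifs <;> rfl

theorem pv_matchSwap_iff (p s : List Char) :
    pvMatchSwap s p = true ↔ p.map pvSwapc <+: s := by
  induction p generalizing s with
  | nil => cases s <;> simp [pvMatchSwap]
  | cons c t ih =>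
    cases s with
    | nil => simp [pvMatchSwap]
    | cons a s' =>
      rw [show pvMatchSwap (a :: s') (c :: t) = ((a == pvSwapc c) && pvMatchSwap s' t) from rfl]
      simp only [List.map_cons, List.cons_prefix_cons, Bool.and_eq_true, beq_iff_eq, ih]
      constructor
      · rintro ⟨h1, h2⟩; exact ⟨h1.symm, h2⟩
      · rintro ⟨h1, h2⟩; exact ⟨h1.symm, h2⟩

theorem pv_scanSwap_eq (p s : List Char) :
    pvScanSwap p s = if p.map pvSwapc <:+: s then 1 else 0 := by
  induction s with
  | nil =>
    simp only [pvScanSwap]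
    by_cases h : p.map pvSwapc <+: ([] : List Char)
    · simp [pv_matchSwap_iff, h, h.isInfix]
    · simp only [List.infix_nil, List.prefix_nil] at *
      simp [pv_matchSwap_iff, List.prefix_nil, List.infix_nil, h]
  | cons c t ih =>
    simp only [pvScanSwap, ih, List.infix_cons_iff]
    by_cases h1 : p.map pvSwapc <+: c :: t
    · simp [pv_matchSwap_iff, h1]
    · by_cases h2 : p.map pvSwapc <:+: t <;>
        simp [pv_matchSwap_iff, h1, h2]

-- ===== VERDICT (by name: the statement is the Claim_ definition above) =====
theorem solution_spec : Claim_equal_solution := by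
  intro myString pat _
  unfold Spec_solution solution solution_alt
  rw [pv_foldl_swap, pv_scanSwap_eq]
  simp only [List.nil_append]
  by_cases h : pat.toList.map pvSwapc <:+: myString.toList
  · simp [PySem.Chars.isIn_iff_infix, h]
  · simp [h, PySem.Chars.isIn_eq_false_iff, h]
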